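-- pv_equiv track=rewrite | github.com/Algorithm-Study-AS/Algorithm-study | 김창성/그리디/2+1 세일-11508.py | calculate
-- ===== SOURCE A (Python) =====
-- def calculate(stuff, N):
--     stuff.sort(reverse=True)
--     order = 0
--     total = 0
--
--     while order < len(stuff):
--         if (order+1) % 3 != 0:
--             total += stuff[order]
--
--         order += 1
--
--     return total
-- ===== SOURCE B (Python) =====
-- def calculate(stuff, N):
--     stuff.sort(reverse=True)
--     total = 0
--     i = 0
--     n = len(stuff)
--     while i < n:
--         basket = stuff[i:i+3]       # next promotion basket of (up to) three items
--         total += sum(basket[:2])    # pay for the two most expensive, third is free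
--         i += 3
--     return total
-- ===== Notes on version B (the rewrite author's own statement) =====
-- stated objective: alternative
-- what changed: Replaces A's per-item index walk with a modulo-3 guard by a basket traversal: after the same in-place descending sort, B strides through the list in groups of three and adds the sum of the first two items of each basket, never testing a modulo condition.
import Mathlib
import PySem

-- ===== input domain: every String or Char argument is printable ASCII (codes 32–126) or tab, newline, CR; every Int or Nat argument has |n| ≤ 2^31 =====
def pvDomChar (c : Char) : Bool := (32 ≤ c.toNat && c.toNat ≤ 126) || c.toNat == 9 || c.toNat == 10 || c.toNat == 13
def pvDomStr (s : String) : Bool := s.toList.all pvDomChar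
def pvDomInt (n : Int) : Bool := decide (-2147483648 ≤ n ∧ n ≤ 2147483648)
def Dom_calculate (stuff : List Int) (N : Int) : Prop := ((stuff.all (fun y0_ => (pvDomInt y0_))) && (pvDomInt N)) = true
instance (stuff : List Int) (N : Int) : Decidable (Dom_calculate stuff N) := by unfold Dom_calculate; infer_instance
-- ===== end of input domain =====

-- B replaces A's per-item index walk with its modulo-3 guard by a basket traversal that
-- strides through the sorted list three at a time, paying for the first two of each basket.
-- Both A and B sort `stuff` in place (same side effect); the theorem is about the return value.

-- ===== PORT A =====
-- the 'while order < len(stuff)' loop of A, step for step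
def calcWhile (s : List Int) (order : Nat) (total : Int) : Int :=
  if h : order < s.length then
    calcWhile s (order + 1) (if (order + 1) % 3 ≠ 0 then total + s[order] else total)
  else total
termination_by s.length - order

def calculate (stuff : List Int) (N : Int) : Int :=
  let s := PySem.List.sorted stuff (fun x => x) true   -- stuff.sort(reverse=True)
  calcWhile s 0 0

-- ===== PORT B =====
-- the 'while i < n' basket loop of B: basket = stuff[i:i+3]; total += sum(basket[:2]); i += 3
def basketWhile (s : List Int) (i : Nat) (total : Int) : Int :=
  if h : i < s.length then
    basketWhile s (i + 3)
      (total + (PySem.List.slice (PySem.List.slice s (some (i : Int)) (some ((i : Int) + 3))) none (some 2)).sum)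
  else total
termination_by s.length - i

def calculate_alt (stuff : List Int) (N : Int) : Int :=
  let s := PySem.List.sorted stuff (fun x => x) true   -- stuff.sort(reverse=True)
  basketWhile s 0 0

-- ===== PRECONDITION & SPEC =====
def Spec_calculate (stuff : List Int) (N : Int) (out : Int) : Prop := out = calculate_alt stuff N
instance (stuff : List Int) (N : Int) (out : Int) : Decidable (Spec_calculate stuff N out) := by unfold Spec_calculate; infer_instance

-- ===== CLAIM (what is proved, stated in full; the proofs are below) =====
def Claim_equal_calculate : Prop := ∀ (stuff : List Int) (N : Int), Dom_calculate stuff N → Spec_calculate stuff N (calculate stuff N)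

-- ===== LEMMAS AND PROOFS =====

-- the pay-two-of-three total, structurally on the list
def chunkPay : List Int → Int
  | a :: b :: _ :: r => a + b + chunkPay r
  | l => l.sum

theorem chunkPay_step (l : List Int) (h : l ≠ []) :
    chunkPay l = (l.take 2).sum + chunkPay (l.drop 3) := by
  match l, h with
  | [a], _ => simp [chunkPay]
  | [a, b], _ => simp [chunkPay]
  | a :: b :: c :: r, _ => simp [chunkPay]

-- the body of A's loop as a structural function on the remaining list
def F : List Int → Nat → Int
  | [], _ => 0
  | x :: xs, o => (if (o + 1) % 3 ≠ 0 then x else 0) + F xs (o + 1)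

theorem calcWhile_eq_F (s : List Int) : ∀ o t, calcWhile s o t = t + F (s.drop o) o := by
  intro o
  induction hm : s.length - o using Nat.strong_induction_on generalizing o with
  | _ m ih =>
    intro t
    rw [calcWhile]
    by_cases h : o < s.length
    · rw [dif_pos h]
      rw [ih (s.length - (o+1)) (by omega) (o+1) rfl]
      have hd : s.drop o = s[o] :: s.drop (o+1) := List.drop_eq_getElem_cons h
      rw [hd]
      simp only [F]
      split_ifs with hg <;> ring
    · rw [dif_neg h]
      rw [List.drop_of_length_le (by omega)]
      simp [F]

theorem F_add3 (l : List Int) : ∀ o, F l (o + 3) = F l o := by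
  induction l with
  | nil => intro o; rfl
  | cons x xs ih =>
    intro o
    simp only [F]
    have hg : (o + 3 + 1) % 3 = (o + 1) % 3 := by omega
    rw [hg]
    have ha : o + 3 + 1 = (o + 1) + 3 := by omega
    rw [ha, ih]

theorem F_zero_eq (l : List Int) : F l 0 = chunkPay l := by
  fun_induction chunkPay l with
  | case1 a b c r ih =>
    simp only [F]
    norm_num
    have h3 : F r 3 = F r 0 := F_add3 r 0
    rw [h3, ih]
    ring
  | case2 l h =>
    match l, h with
    | [], _ => rfl
    | [a], _ => simp [F]
    | [a, b], _ => simp [F]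
    | a :: b :: c :: r, h => exact absurd rfl (h a b c r)

theorem basketWhile_eq (s : List Int) : ∀ i t, basketWhile s i t = t + chunkPay (s.drop i) := by
  intro i
  induction hm : s.length - i using Nat.strong_induction_on generalizing i with
  | _ m ih =>
    intro t
    rw [basketWhile]
    by_cases h : i < s.length
    · rw [dif_pos h]
      rw [ih (s.length - (i+3)) (by omega) (i+3) rfl]
      have hsl : PySem.List.slice s (some (i : Int)) (some ((i : Int) + 3)) = (s.drop i).take 3 := by
        have := PySem.List.slice_natCast_add s i 3
        exact_mod_cast this
      rw [hsl, PySem.List.slice_to _ (by norm_num : (0:Int) ≤ 2)]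
      have hne : s.drop i ≠ [] := by
        intro hc
        have := List.drop_eq_nil_iff.mp hc
        omega
      rw [chunkPay_step (s.drop i) hne]
      have hdd : (s.drop i).drop 3 = s.drop (i + 3) := by rw [List.drop_drop, Nat.add_comm]
      have htt : (((s.drop i).take 3).take (2:Int).toNat) = (s.drop i).take 2 := by
        rw [List.take_take]; norm_num; omega
      rw [hdd, htt]
      ring
    · rw [dif_neg h]
      rw [List.drop_of_length_le (by omega)]
      simp [chunkPay]

-- ===== VERDICT (by name: the statement is the Claim_ definition above) =====
theorem calculate_spec : Claim_equal_calculate := by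
  intro stuff N _
  unfold Spec_calculate calculate calculate_alt
  rw [calcWhile_eq_F, basketWhile_eq]
  simp only [List.drop_zero]
  rw [F_zero_eq]
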